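-- pv_equiv track=rewrite | github.com/digling/sinotibetan | scripts/compare_lists.py | find_break
-- ===== SOURCE A (Python) =====
-- def find_break(word):
--
--     out = ''
--     for char in word:
--         if char not in '([{,;':
--             out += char
--         else:
--             break
--     return out.strip()
-- ===== SOURCE B (Python) =====
-- def find_break(word):
--     positions = [p for p in (word.find(c) for c in '([{,;') if p != -1]
--     idx = min(positions) if positions else len(word)
--     return word[:idx].strip()
-- ===== Notes on version B (the rewrite author's own statement) =====
-- stated objective: faster
-- what changed: A's accumulate-characters-until-first-delimiter Python loop with string concatenation is replaced by computing the break index directly: one str.find per delimiter character, min of the found positions (falling back to len(word)), then a single slice and strip.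
import Mathlib
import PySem

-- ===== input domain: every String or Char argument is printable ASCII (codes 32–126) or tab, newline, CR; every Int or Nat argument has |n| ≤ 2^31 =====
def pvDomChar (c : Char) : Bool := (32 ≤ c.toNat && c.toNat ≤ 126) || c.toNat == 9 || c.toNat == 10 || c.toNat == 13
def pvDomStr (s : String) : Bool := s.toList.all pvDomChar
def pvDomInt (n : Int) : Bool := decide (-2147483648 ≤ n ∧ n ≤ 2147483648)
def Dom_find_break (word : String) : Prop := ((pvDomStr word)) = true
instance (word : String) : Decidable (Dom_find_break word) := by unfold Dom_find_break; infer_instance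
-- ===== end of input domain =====

-- B replaces A's accumulate-until-first-delimiter loop by per-delimiter str.find scans,
-- a min over the found positions, and one slice+strip (same O(n), measurably faster constant factor in Python).

-- ===== PORT A =====
-- the for-loop with break: collect chars until the first delimiter
def findBreakLoop (cs : List Char) : List Char :=
  match cs with
  | [] => []
  | c :: rest =>
      if PySem.Chars.isIn [c] "([{,;".toList then []   -- 'char not in' failed: break
      else c :: findBreakLoop rest                      -- out += char

def find_break (word : String) : String :=
  String.ofList (PySem.Chars.strip (findBreakLoop word.toList))

-- ===== PORT B =====
def find_break_alt (word : String) : String :=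
  let positions := ("([{,;".toList.map (fun c => PySem.Str.find word (String.ofList [c]))).filter (fun p => p ≠ -1)
  let idx : Int :=
    match PySem.List.min? positions id with
    | some m => m
    | none => PySem.Str.len word
  PySem.Str.strip (PySem.Str.slice word none (some idx))

-- ===== PRECONDITION & SPEC =====
def Spec_find_break (word : String) (out : String) : Prop := out = find_break_alt word
instance (word : String) (out : String) : Decidable (Spec_find_break word out) := by unfold Spec_find_break; infer_instance

-- ===== CLAIM (what is proved, stated in full; the proofs are below) =====
def Claim_equal_find_break : Prop := ∀ (word : String), Dom_find_break word → Spec_find_break word (find_break word)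

-- ===== LEMMAS AND PROOFS =====

def pvDelims : List Char := "([{,;".toList

theorem prefix_singleton_iff (c : Char) (t : List Char) : ([c] <+: t) ↔ t.head? = some c := by
  cases t with
  | nil => simp
  | cons a t => simp [List.cons_prefix_cons, eq_comm]

theorem prefix_singleton_drop (c : Char) (l : List Char) (i : Nat) :
    ([c] <+: l.drop i) ↔ l[i]? = some c := by
  rw [prefix_singleton_iff, List.head?_drop]

-- characterization of s.find(c) for a single character
theorem find_single (l : List Char) (c : Char) (h : c ∈ l) :
    PySem.Chars.find l [c] = (l.findIdx (· == c) : Int) := by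
  have hne : PySem.Chars.find l [c] ≠ -1 :=
    (PySem.Chars.find_ne_neg_one_iff l [c]).mpr ((List.singleton_infix_iff c l).mpr h)
  have hnn : 0 ≤ PySem.Chars.find l [c] := by
    rw [PySem.Chars.find_nonneg_iff]; exact (List.singleton_infix_iff c l).mpr h
  obtain ⟨hpre, hmin⟩ := PySem.Chars.find_spec hnn
  rw [prefix_singleton_drop] at hpre
  set k := (PySem.Chars.find l [c]).toNat with hk
  have hkl : k < l.length := by
    by_contra hc
    simp [List.getElem?_eq_none (le_of_not_gt hc)] at hpre
  have hfi : l.findIdx (· == c) = k := by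
    have hle : l.findIdx (· == c) ≤ k := by
      by_contra hc
      have hthis := List.not_of_lt_findIdx (lt_of_not_ge hc)
      rw [List.getElem?_eq_getElem hkl] at hpre
      simp only [Option.some.injEq] at hpre
      simp at hthis
      exact hthis hpre
    rcases Nat.lt_or_ge (l.findIdx (· == c)) k with hlt | hge
    · exfalso
      have hfl : l.findIdx (· == c) < l.length := lt_trans hlt hkl
      have := @List.findIdx_getElem _ (· == c) l hfl
      have h2 := hmin _ hlt
      rw [prefix_singleton_drop, List.getElem?_eq_getElem hfl] at h2
      simp only [beq_iff_eq] at this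
      exact h2 (by simp [this])
    · omega
  omega

theorem findIdx_le_of_getElem {α : Type} (p : α → Bool) (l : List α) (i : Nat)
    (hi : i < l.length) (h : p l[i] = true) : l.findIdx p ≤ i := by
  by_contra hc
  have hthis := List.not_of_lt_findIdx (lt_of_not_ge hc)
  exact Bool.noConfusion (h.symm.trans hthis)

-- A's loop is takeWhile (not a delimiter)
theorem findBreakLoop_eq (l : List Char) :
    findBreakLoop l = l.takeWhile (fun c => !pvDelims.contains c) := by
  induction l with
  | nil => rfl
  | cons c rest ih =>
      rw [findBreakLoop, List.takeWhile_cons]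
      have : PySem.Chars.isIn [c] "([{,;".toList = pvDelims.contains c := by
        rw [show "([{,;".toList = pvDelims from rfl]
        by_cases hm : c ∈ pvDelims
        · rw [(PySem.Chars.isIn_iff_infix _ _).mpr ((List.singleton_infix_iff c _).mpr hm)]
          simp [hm]
        · rw [(PySem.Chars.isIn_eq_false_iff _ _).mpr (by rw [List.singleton_infix_iff]; exact hm)]
          simp [hm]
      rw [this]
      by_cases hd : c ∈ pvDelims
      · simp [hd]
      · simp [hd, ih]

-- B's break index is the index of the first delimiter
theorem alt_idx_eq (l : List Char) :
    (match PySem.List.min?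
        ((pvDelims.map (fun c => PySem.Chars.find l [c])).filter (fun p => p ≠ -1)) id with
      | some m => m
      | none => (l.length : Int)) = (l.findIdx (fun c => pvDelims.contains c) : Int) := by
  set positions := (pvDelims.map (fun c => PySem.Chars.find l [c])).filter (fun p => p ≠ -1) with hpos
  cases hmin : PySem.List.min? positions id with
  | none =>
      -- no delimiter occurs in l
      have hemp : positions = [] := (PySem.List.min?_eq_none_iff positions id).mp hmin
      have hnone : ∀ c ∈ pvDelims, c ∉ l := by
        intro c hc hcl
        have hne : PySem.Chars.find l [c] ≠ -1 :=
          (PySem.Chars.find_ne_neg_one_iff l [c]).mpr ((List.singleton_infix_iff c l).mpr hcl)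
        have : PySem.Chars.find l [c] ∈ positions := by
          rw [hpos]; simp only [List.mem_filter, List.mem_map]
          exact ⟨⟨c, hc, rfl⟩, by simpa using hne⟩
        simp [hemp] at this
      simp only [List.contains_eq_mem]
      simp
      symm
      rw [List.findIdx_eq_length]
      intro x hx
      simp only [decide_eq_false_iff_not]
      exact fun hmem => hnone x hmem hx
  | some m =>
      show m = ((l.findIdx (fun c => pvDelims.contains c) : Nat) : Int)
      have hmem := PySem.List.min?_mem hmin
      have hle := PySem.List.min?_isMin hmin
      rw [hpos, List.mem_filter, List.mem_map] at hmem
      obtain ⟨⟨c, hc, hfc⟩, hne⟩ := hmem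
      have hcl : c ∈ l := by
        by_contra hcl
        have h0 : PySem.Chars.find l [c] = -1 :=
          (PySem.Chars.find_eq_neg_one_iff l [c]).mpr
            (by rw [List.singleton_infix_iff]; exact hcl)
        rw [hfc] at h0
        simp [h0] at hne
      rw [find_single l c hcl] at hfc
      set n := l.findIdx (fun c => pvDelims.contains c) with hn
      have hclen : l.findIdx (· == c) < l.length := List.findIdx_lt_length.mpr ⟨c, hcl, by simp⟩
      -- n ≤ findIdx (== c)
      have hn_le : n ≤ l.findIdx (· == c) := by
        apply findIdx_le_of_getElem _ _ _ hclen
        have := @List.findIdx_getElem _ (· == c) l hclen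
        simp only [beq_iff_eq] at this
        simp [this, List.contains_eq_mem, hc]
      -- findIdx of the delimiter found at n is ≤ n, and m ≤ it
      have hnlen : n < l.length := by
        calc n ≤ l.findIdx (· == c) := hn_le
          _ < l.length := hclen
      have hdn := @List.findIdx_getElem _ (fun c => pvDelims.contains c) l hnlen
      set d := l[n] with hd
      have hdl : d ∈ l := List.getElem_mem hnlen
      have hdmem : d ∈ pvDelims := by simpa [List.contains_eq_mem] using hdn
      have hfd : PySem.Chars.find l [d] ∈ positions := by
        rw [hpos, List.mem_filter]
        constructor
        · exact List.mem_map.mpr ⟨d, hdmem, rfl⟩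
        · simp only [ne_eq, decide_eq_true_eq]
          exact (PySem.Chars.find_ne_neg_one_iff l [d]).mpr ((List.singleton_infix_iff d l).mpr hdl)
      have hmd := hle _ hfd
      rw [find_single l d hdl] at hmd
      have hdle : l.findIdx (· == d) ≤ n := by
        apply findIdx_le_of_getElem _ _ _ hnlen
        simp [← hd]
      simp only [id] at hmd
      -- m = findIdx (== c); show it equals n
      have h1 : (n : Int) ≤ (l.findIdx (· == c) : Int) := by exact_mod_cast hn_le
      have h2 : (l.findIdx (· == d) : Int) ≤ (n : Int) := by exact_mod_cast hdle
      rw [← hfc]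
      omega

-- ===== VERDICT (by name: the statement is the Claim_ definition above) =====
theorem find_break_spec : Claim_equal_find_break := by
  intro word _
  unfold Spec_find_break find_break find_break_alt
  apply String.toList_inj.mp
  simp only [PySem.Str.toList_strip, PySem.Str.toList_slice, PySem.Str.find_eq, PySem.Str.len_eq,
    String.toList_ofList]
  congr 1
  rw [findBreakLoop_eq, PySem.Chars.slice_eq_listSlice,
    show "([{,;".toList = pvDelims from rfl, alt_idx_eq word.toList]
  have hnn : (0:Int) ≤ (word.toList.findIdx (fun c => pvDelims.contains c) : Int) := by positivity
  rw [PySem.List.slice_to _ hnn, List.takeWhile_eq_take_findIdx_not]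
  simp
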